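-- pv_equiv track=rewrite | github.com/DavidCDCB/PythonMicroProyectos | Grafos/ProyectoEstructuras/ProyectoEstructuras/Generador.py | punto
-- ===== SOURCE A (Python) =====
-- def punto(t):
-- 	cad=""
-- 	puesto=False
-- 	for c in t:
-- 		if(c!=" " and puesto==False):
-- 			cad+="."+c
-- 			puesto=True
-- 		else:
-- 			cad+=c
-- 	return cad
-- ===== SOURCE B (Python) =====
-- def punto(t):
--     i = len(t) - len(t.lstrip(" "))
--     if i == len(t):
--         return t
--     return t[:i] + "." + t[i:]
-- ===== Notes on version B (the rewrite author's own statement) =====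
-- stated objective: idiomatic
-- what changed: Replaces the char-by-char building loop with a seen-flag by computing the leading-space prefix length via lstrip restricted to spaces and splicing the dot in with string slicing.
import Mathlib
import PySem

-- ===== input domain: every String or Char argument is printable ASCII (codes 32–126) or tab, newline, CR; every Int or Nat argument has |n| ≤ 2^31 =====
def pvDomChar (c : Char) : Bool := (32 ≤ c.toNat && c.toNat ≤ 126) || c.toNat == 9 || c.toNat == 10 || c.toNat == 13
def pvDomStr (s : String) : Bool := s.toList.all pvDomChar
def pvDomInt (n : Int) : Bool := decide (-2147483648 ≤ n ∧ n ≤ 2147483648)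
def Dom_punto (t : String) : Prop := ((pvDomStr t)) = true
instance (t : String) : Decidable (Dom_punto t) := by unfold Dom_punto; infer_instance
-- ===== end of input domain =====

-- B replaces A's char-by-char loop with a leading-space prefix length plus a slice splice (idiomatic).

-- ===== PORT A =====
-- the loop 'for c in t' with state (cad, puesto)
def punto (t : String) : String :=
  let r := t.toList.foldl
    (fun (st : List Char × Bool) c =>
      if c ≠ ' ' ∧ st.2 = false then (st.1 ++ ['.', c], true) else (st.1 ++ [c], st.2))
    ([], false)
  String.ofList r.1

-- ===== PORT B =====
-- t.lstrip(" ") ported by hand as dropWhile (== ' ') (exact: lstrip with the explicit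
-- single-char argument removes exactly leading ' '); slicing via take/drop on the char list.
def punto_alt (t : String) : String :=
  let cs := t.toList
  let i := cs.length - (cs.dropWhile (fun c => c == ' ')).length
  if i = cs.length then t
  else String.ofList (cs.take i ++ '.' :: cs.drop i)

-- ===== PRECONDITION & SPEC =====
def Spec_punto (t : String) (out : String) : Prop := out = punto_alt t
instance (t : String) (out : String) : Decidable (Spec_punto t out) := by unfold Spec_punto; infer_instance

-- ===== CLAIM (what is proved, stated in full; the proofs are below) =====
def Claim_equal_punto : Prop := ∀ (t : String), Dom_punto t → Spec_punto t (punto t)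

-- ===== LEMMAS AND PROOFS =====

-- once 'puesto' is true the loop only appends the remaining characters
theorem punto_fold_true (cs acc : List Char) :
    cs.foldl (fun (st : List Char × Bool) c =>
      if c ≠ ' ' ∧ st.2 = false then (st.1 ++ ['.', c], true) else (st.1 ++ [c], st.2))
      (acc, true) = (acc ++ cs, true) := by
  induction cs generalizing acc with
  | nil => simp
  | cons c cs ih => simp [ih]

-- characterisation of A's loop from the 'puesto = false' state
theorem punto_fold_false (cs acc : List Char) :
    cs.foldl (fun (st : List Char × Bool) c =>
      if c ≠ ' ' ∧ st.2 = false then (st.1 ++ ['.', c], true) else (st.1 ++ [c], st.2))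
      (acc, false) =
    if cs.dropWhile (fun c => c == ' ') = [] then (acc ++ cs, false)
    else (acc ++ cs.takeWhile (fun c => c == ' ') ++ '.' :: cs.dropWhile (fun c => c == ' '), true) := by
  induction cs generalizing acc with
  | nil => simp
  | cons c cs ih =>
    by_cases hc : c = ' '
    · subst hc
      rw [List.foldl_cons,
        show (if (' ' ≠ ' ' ∧ ((acc, false) : List Char × Bool).2 = false)
            then (acc ++ ['.', ' '], true) else (acc ++ [' '], ((acc, false) : List Char × Bool).2))
          = ((acc ++ [' '], false) : List Char × Bool) by simp, ih]
      by_cases h2 : cs.dropWhile (fun c => c == ' ') = [] <;> simp [h2]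
    · rw [List.foldl_cons,
        show (if (c ≠ ' ' ∧ ((acc, false) : List Char × Bool).2 = false)
            then (acc ++ ['.', c], true) else (acc ++ [c], ((acc, false) : List Char × Bool).2))
          = ((acc ++ ['.', c], true) : List Char × Bool) by simp [hc],
        punto_fold_true]
      simp [hc]

-- the list-level equality behind punto = punto_alt
theorem punto_list_eq (cs : List Char) :
    (cs.foldl (fun (st : List Char × Bool) c =>
        if c ≠ ' ' ∧ st.2 = false then (st.1 ++ ['.', c], true) else (st.1 ++ [c], st.2))
      ([], false)).1 =
    (if cs.length - (cs.dropWhile (fun c => c == ' ')).length = cs.length then cs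
     else cs.take (cs.length - (cs.dropWhile (fun c => c == ' ')).length) ++
       '.' :: cs.drop (cs.length - (cs.dropWhile (fun c => c == ' ')).length)) := by
  rw [punto_fold_false]
  have hsplit : cs.takeWhile (fun c => c == ' ') ++ cs.dropWhile (fun c => c == ' ') = cs :=
    List.takeWhile_append_dropWhile
  have hlen := congrArg List.length hsplit
  simp only [List.length_append] at hlen
  by_cases hdw : cs.dropWhile (fun c => c == ' ') = []
  · rw [if_pos hdw, if_pos (by simp [hdw])]
    simp
  · have hne : cs.length - (cs.dropWhile (fun c => c == ' ')).length ≠ cs.length := by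
      have : (cs.dropWhile (fun c => c == ' ')).length ≠ 0 := by
        simpa [List.length_eq_zero_iff] using hdw
      omega
    rw [if_neg hdw, if_neg hne]
    have hi : cs.length - (cs.dropWhile (fun c => c == ' ')).length
        = (cs.takeWhile (fun c => c == ' ')).length := by omega
    have htake : cs.take (cs.takeWhile (fun c => c == ' ')).length = cs.takeWhile (fun c => c == ' ') := by
      have h := List.take_left (l₁ := cs.takeWhile (fun c => c == ' ')) (l₂ := cs.dropWhile (fun c => c == ' '))
      rwa [hsplit] at h
    have hdrop : cs.drop (cs.takeWhile (fun c => c == ' ')).length = cs.dropWhile (fun c => c == ' ') := by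
      have h := List.drop_left (l₁ := cs.takeWhile (fun c => c == ' ')) (l₂ := cs.dropWhile (fun c => c == ' '))
      rwa [hsplit] at h
    rw [hi, htake, hdrop]
    simp

theorem punto_eq (t : String) : punto t = punto_alt t := by
  simp only [punto, punto_alt]
  rw [punto_list_eq]
  split
  · exact String.ofList_toList
  · rfl

-- ===== VERDICT (by name: the statement is the Claim_ definition above) =====
theorem punto_spec : Claim_equal_punto := by
  intro t _
  exact punto_eq t
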